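-- pv_equiv track=rewrite | github.com/Melodiz/dailycode | HSE/ADS_contests/Strings_1/z-to-prifix-function.py | z_to_prefix
-- ===== SOURCE A (Python) =====
-- def z_to_prefix(z):
--     p = [0] * len(z)
--     for i in range(1, len(z)):
--         for j in range(z[i] - 1, -1, -1):
--             if p[i + j] > 0:
--                 break
--             else:
--                 p[i + j] = j + 1
--     return p
-- ===== SOURCE B (Python) =====
-- def z_to_prefix(z):
--     n = len(z)
--     p = [0] * n
--     for i in range(1, n):
--         zi = z[i]
--         if zi > 0:
--             e = i + zi - 1
--             if p[e] < zi:
--                 p[e] = zi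
--     for k in range(n - 1, 0, -1):
--         if p[k] - 1 > p[k - 1]:
--             p[k - 1] = p[k] - 1
--     return p
-- ===== Notes on version B (the rewrite author's own statement) =====
-- stated objective: alternative
-- what changed: Replaces A's per-i inner write-until-break loop over each Z-block by a two-pass conversion: a forward pass records only each block's endpoint value z[i] at position i+z[i]-1, and a single backward pass relaxes p[k-1] = max(p[k-1], p[k]-1), propagating endpoint values down one step at a time.
import Mathlib
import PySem

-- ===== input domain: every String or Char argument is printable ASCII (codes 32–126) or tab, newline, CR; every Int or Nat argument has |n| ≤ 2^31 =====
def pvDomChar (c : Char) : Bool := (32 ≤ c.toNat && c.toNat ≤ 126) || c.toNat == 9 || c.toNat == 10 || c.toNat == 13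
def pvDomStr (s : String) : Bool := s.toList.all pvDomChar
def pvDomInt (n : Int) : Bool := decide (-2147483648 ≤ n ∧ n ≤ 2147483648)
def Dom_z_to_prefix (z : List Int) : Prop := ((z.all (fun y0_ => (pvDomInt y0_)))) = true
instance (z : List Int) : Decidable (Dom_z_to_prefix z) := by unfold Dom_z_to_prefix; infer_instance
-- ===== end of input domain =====

-- B replaces A's inner write-until-break loop per Z-block by a two-pass endpoint-record / backward-relax conversion (alternative algorithm, same cost).

-- ===== PORT A =====
-- inner 'for j in range(z[i]-1, -1, -1)' with its break, as structural recursion on the range list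
def pvInnerA (i : Int) (js : List Int) (p : List Int) : List Int :=
  match js with
  | [] => p
  | j :: rest =>
      if PySem.List.pyGetD p (i + j) 0 > 0 then p
      else pvInnerA i rest (PySem.List.pySetD p (i + j) (j + 1))

def z_to_prefix (z : List Int) : List Int :=
  (PySem.List.pyRange 1 z.length 1).foldl
    (fun p i => pvInnerA i (PySem.List.pyRange (PySem.List.pyGetD z i 0 - 1) (-1) (-1)) p)
    (List.replicate z.length 0)

-- ===== PORT B =====
def z_to_prefix_alt (z : List Int) : List Int :=
  let n : Int := z.length
  let p1 := (PySem.List.pyRange 1 n 1).foldl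
    (fun p i =>
      let zi := PySem.List.pyGetD z i 0
      if zi > 0 then
        let e := i + zi - 1
        if PySem.List.pyGetD p e 0 < zi then PySem.List.pySetD p e zi else p
      else p)
    (List.replicate z.length 0)
  (PySem.List.pyRange (n - 1) 0 (-1)).foldl
    (fun p k =>
      if PySem.List.pyGetD p k 0 - 1 > PySem.List.pyGetD p (k - 1) 0 then
        PySem.List.pySetD p (k - 1) (PySem.List.pyGetD p k 0 - 1)
      else p)
    p1

-- ===== PRECONDITION & SPEC =====
-- Pre excludes exactly the inputs where A raises IndexError: some i≥1 with z[i] > len(z) - i.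
def Pre_z_to_prefix (z : List Int) : Prop :=
  ∀ i ∈ List.range z.length, 1 ≤ i → z.getD i 0 + (i : Int) ≤ (z.length : Int)
instance (z : List Int) : Decidable (Pre_z_to_prefix z) := by unfold Pre_z_to_prefix; infer_instance

def pvWitness_z_to_prefix : List Int := [0, 0, 3, 0, 1, 0]

def Spec_z_to_prefix (z : List Int) (out : List Int) : Prop := out = z_to_prefix_alt z
instance (z : List Int) (out : List Int) : Decidable (Spec_z_to_prefix z out) := by unfold Spec_z_to_prefix; infer_instance

-- ===== CLAIM (what is proved, stated in full; the proofs are below) =====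
def Claim_equal_z_to_prefix : Prop := ∀ (z : List Int), Dom_z_to_prefix z → Pre_z_to_prefix z → Spec_z_to_prefix z (z_to_prefix z)

-- ===== LEMMAS AND PROOFS =====

-- candidate value that block i (1-based start, reach z[i]) contributes to position pos
def pvCand (z : List Int) (i pos : Nat) : Int :=
  if 1 ≤ i ∧ i ≤ pos ∧ (pos : Int) ≤ (i : Int) + z.getD i 0 - 1 then (pos : Int) - i + 1 else 0

-- max of pvCand over i ∈ [1, m]
def pvCanon (z : List Int) : Nat → Nat → Int
  | 0, _ => 0
  | m + 1, pos => max (pvCanon z m pos) (pvCand z (m + 1) pos)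

-- endpoint candidate: z[i] if pos = i + z[i] - 1 (z[i] > 0)
def pvECand (z : List Int) (i pos : Nat) : Int :=
  if 1 ≤ i ∧ 0 < z.getD i 0 ∧ (pos : Int) = (i : Int) + z.getD i 0 - 1 then z.getD i 0 else 0

def pvEMax (z : List Int) : Nat → Nat → Int
  | 0, _ => 0
  | m + 1, pos => max (pvEMax z m pos) (pvECand z (m + 1) pos)

theorem pvCanon_succ (z : List Int) (m pos : Nat) :
    pvCanon z (m + 1) pos = max (pvCanon z m pos) (pvCand z (m + 1) pos) := rfl

theorem pvEMax_succ (z : List Int) (m pos : Nat) :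
    pvEMax z (m + 1) pos = max (pvEMax z m pos) (pvECand z (m + 1) pos) := rfl

theorem pvCand_nonneg (z : List Int) (i pos : Nat) : 0 ≤ pvCand z i pos := by
  unfold pvCand; split_ifs with h
  · omega
  · omega

theorem pvCanon_nonneg (z : List Int) (m pos : Nat) : 0 ≤ pvCanon z m pos := by
  induction m with
  | zero => simp [pvCanon]
  | succ m ih => exact le_trans ih (le_max_left _ _)

theorem pvEMax_nonneg (z : List Int) (m pos : Nat) : 0 ≤ pvEMax z m pos := by
  induction m with
  | zero => simp [pvEMax]
  | succ m ih => exact le_trans ih (le_max_left _ _)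

theorem pvCand_le_canon (z : List Int) {i m : Nat} (pos : Nat) (h1 : 1 ≤ i) (h2 : i ≤ m) :
    pvCand z i pos ≤ pvCanon z m pos := by
  induction m with
  | zero => omega
  | succ m ih =>
      rcases Nat.lt_or_ge i (m + 1) with h | h
      · exact le_trans (ih (by omega)) (le_max_left _ _)
      · have : i = m + 1 := by omega
        subst this; exact le_max_right _ _

theorem pvECand_le_emax (z : List Int) {i m : Nat} (pos : Nat) (h1 : 1 ≤ i) (h2 : i ≤ m) :
    pvECand z i pos ≤ pvEMax z m pos := by
  induction m with
  | zero => omega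
  | succ m ih =>
      rcases Nat.lt_or_ge i (m + 1) with h | h
      · exact le_trans (ih (by omega)) (le_max_left _ _)
      · have : i = m + 1 := by omega
        subst this; exact le_max_right _ _

theorem pvCanon_pos_exists (z : List Int) {m pos : Nat} (h : 0 < pvCanon z m pos) :
    ∃ i, 1 ≤ i ∧ i ≤ m ∧ 0 < pvCand z i pos := by
  induction m with
  | zero => simp [pvCanon] at h
  | succ m ih =>
      unfold pvCanon at h
      rcases lt_max_iff.mp h with h' | h'
      · obtain ⟨i, hi1, hi2, hi3⟩ := ih h'
        exact ⟨i, hi1, by omega, hi3⟩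
      · exact ⟨m + 1, by omega, le_refl _, h'⟩

-- pvCand i pos > 0 unpacks to the coverage facts
theorem pvCand_pos_iff (z : List Int) (i pos : Nat) :
    0 < pvCand z i pos ↔ (1 ≤ i ∧ i ≤ pos ∧ (pos : Int) ≤ (i : Int) + z.getD i 0 - 1) := by
  unfold pvCand; split_ifs with h
  · constructor
    · intro _; exact h
    · intro _; omega
  · constructor
    · intro hc; omega
    · intro hc; exact absurd hc h

theorem pvCand_eq_of_pos (z : List Int) {i pos : Nat}
    (h : 1 ≤ i ∧ i ≤ pos ∧ (pos : Int) ≤ (i : Int) + z.getD i 0 - 1) :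
    pvCand z i pos = (pos : Int) - i + 1 := by
  unfold pvCand; rw [if_pos h]

-- downward shift: canon (pos+1) - 1 ≤ canon pos
theorem pvCanon_shift (z : List Int) (m pos : Nat) :
    pvCanon z m (pos + 1) - 1 ≤ pvCanon z m pos := by
  induction m with
  | zero => simp [pvCanon]
  | succ m ih =>
      have hC := pvCanon_nonneg z m pos
      have hkey : pvCand z (m + 1) (pos + 1) - 1 ≤ max (pvCanon z m pos) (pvCand z (m + 1) pos) := by
        by_cases hc : 0 < pvCand z (m + 1) (pos + 1)
        · obtain ⟨h1, h2, h3⟩ := (pvCand_pos_iff z (m + 1) (pos + 1)).mp hc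
          have hv1 := pvCand_eq_of_pos z ⟨h1, h2, h3⟩
          push_cast at h3 hv1
          by_cases hip : m + 1 ≤ pos
          · have hv2 : pvCand z (m + 1) pos = (pos : Int) - (m + 1) + 1 :=
              pvCand_eq_of_pos z ⟨by omega, hip, by push_cast; omega⟩
            have := le_max_right (pvCanon z m pos) (pvCand z (m + 1) pos)
            push_cast at hv2 ⊢
            omega
          · have := le_max_left (pvCanon z m pos) (pvCand z (m + 1) pos)
            omega
        · have h0 := pvCand_nonneg z (m + 1) (pos + 1)
          have := le_max_left (pvCanon z m pos) (pvCand z (m + 1) pos)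
          omega
      rw [pvCanon_succ, pvCanon_succ]
      omega

theorem pvECand_le_cand (z : List Int) (i pos : Nat) : pvECand z i pos ≤ pvCand z i pos := by
  by_cases h : 1 ≤ i ∧ 0 < z.getD i 0 ∧ (pos : Int) = (i : Int) + z.getD i 0 - 1
  · have hE : pvECand z i pos = z.getD i 0 := by unfold pvECand; rw [if_pos h]
    have hv := pvCand_eq_of_pos z (i := i) (pos := pos) ⟨h.1, by omega, by omega⟩
    omega
  · have hE : pvECand z i pos = 0 := by unfold pvECand; rw [if_neg h]
    have := pvCand_nonneg z i pos
    omega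

-- emax ≤ canon pointwise
theorem pvEMax_le_canon (z : List Int) (m pos : Nat) :
    pvEMax z m pos ≤ pvCanon z m pos := by
  induction m with
  | zero => simp [pvEMax, pvCanon]
  | succ m ih =>
      have := pvECand_le_cand z (m + 1) pos
      rw [pvEMax_succ, pvCanon_succ]
      omega

-- ≤ direction of the backward-relaxation characterisation
theorem pvCanon_le_relax (z : List Int) (m pos : Nat) :
    pvCanon z m pos ≤ max (pvEMax z m pos) (pvCanon z m (pos + 1) - 1) := by
  induction m with
  | zero => simp [pvCanon, pvEMax]
  | succ m ih =>
      have hkey : pvCand z (m + 1) pos ≤ max (pvEMax z (m + 1) pos) (pvCanon z (m + 1) (pos + 1) - 1) := by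
        by_cases hc : 0 < pvCand z (m + 1) pos
        · obtain ⟨h1, h2, h3⟩ := (pvCand_pos_iff z (m + 1) pos).mp hc
          have hv := pvCand_eq_of_pos z ⟨h1, h2, h3⟩
          by_cases he : (pos : Int) = ((m + 1 : Nat) : Int) + z.getD (m + 1) 0 - 1
          · have hzpos : 0 < z.getD (m + 1) 0 := by push_cast at h3 he ⊢; omega
            have hE : pvECand z (m + 1) pos = z.getD (m + 1) 0 := by
              unfold pvECand; rw [if_pos ⟨h1, hzpos, he⟩]
            have hle : pvECand z (m + 1) pos ≤ pvEMax z (m + 1) pos :=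
              pvECand_le_emax z pos (by omega) (le_refl _)
            have := le_max_left (pvEMax z (m + 1) pos) (pvCanon z (m + 1) (pos + 1) - 1)
            push_cast at he hv ⊢
            omega
          · have hv2 : pvCand z (m + 1) (pos + 1) = ((pos + 1 : Nat) : Int) - (m + 1) + 1 :=
              pvCand_eq_of_pos z ⟨h1, by omega, by push_cast at h3 he ⊢; omega⟩
            have hle : pvCand z (m + 1) (pos + 1) ≤ pvCanon z (m + 1) (pos + 1) :=
              pvCand_le_canon z (pos + 1) (by omega) (le_refl _)
            have := le_max_right (pvEMax z (m + 1) pos) (pvCanon z (m + 1) (pos + 1) - 1)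
            push_cast at hv hv2 ⊢
            omega
        · have h0 := pvCand_nonneg z (m + 1) pos
          have hE := pvEMax_nonneg z (m + 1) pos
          have := le_max_left (pvEMax z (m + 1) pos) (pvCanon z (m + 1) (pos + 1) - 1)
          omega
      have hmonE : pvEMax z m pos ≤ pvEMax z (m + 1) pos := by
        rw [pvEMax_succ]; omega
      have hmonC : pvCanon z m (pos + 1) ≤ pvCanon z (m + 1) (pos + 1) := by
        rw [pvCanon_succ (z := z) (m := m) (pos := pos + 1)]; omega
      rw [pvCanon_succ]
      omega

-- the backward-relaxation characterisation
theorem pvCanon_char (z : List Int) (m pos : Nat) :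
    pvCanon z m pos
      = max (pvEMax z m pos) (pvCanon z m (pos + 1) - 1) := by
  refine le_antisymm (pvCanon_le_relax z m pos) (max_le (pvEMax_le_canon z m pos) (pvCanon_shift z m pos))

-- top position: canon m (n-1) = emax m (n-1) for m ≤ n-1  (needs Pre)
theorem pvCanon_top (z : List Int) (hPre : Pre_z_to_prefix z) (h1 : 1 ≤ z.length) (m : Nat)
    (hm : m ≤ z.length - 1) :
    pvCanon z m (z.length - 1) = pvEMax z m (z.length - 1) := by
  refine le_antisymm ?_ (pvEMax_le_canon z m _)
  induction m with
  | zero => simp [pvCanon, pvEMax]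
  | succ m ih =>
      have hkey : pvCand z (m + 1) (z.length - 1) ≤ pvEMax z (m + 1) (z.length - 1) := by
        by_cases hc : 0 < pvCand z (m + 1) (z.length - 1)
        · obtain ⟨hh1, hh2, hh3⟩ := (pvCand_pos_iff z (m + 1) (z.length - 1)).mp hc
          have hv := pvCand_eq_of_pos z ⟨hh1, hh2, hh3⟩
          have hPm := hPre (m + 1) (List.mem_range.mpr (by omega)) (by omega)
          have hzpos : 0 < z.getD (m + 1) 0 := by
            have : ((z.length - 1 : Nat) : Int) = (z.length : Int) - 1 := by omega
            push_cast at hh3; omega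
          have he : ((z.length - 1 : Nat) : Int) = ((m + 1 : Nat) : Int) + z.getD (m + 1) 0 - 1 := by
            push_cast at hh3 ⊢; omega
          have hE : pvECand z (m + 1) (z.length - 1) = z.getD (m + 1) 0 := by
            unfold pvECand; rw [if_pos ⟨hh1, hzpos, he⟩]
          have hle : pvECand z (m + 1) (z.length - 1) ≤ pvEMax z (m + 1) (z.length - 1) :=
            pvECand_le_emax z _ (by omega) (le_refl _)
          push_cast at hv he ⊢
          omega
        · have h0 := pvCand_nonneg z (m + 1) (z.length - 1)
          have hE := pvEMax_nonneg z (m + 1) (z.length - 1)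
          omega
      have hmonE : pvEMax z m (z.length - 1) ≤ pvEMax z (m + 1) (z.length - 1) := by
        rw [pvEMax_succ]; omega
      have hih := ih (by omega)
      rw [pvCanon_succ]
      omega

-- ===== A-side =====

theorem pvGetD_set (p : List Int) (k r : Nat) (v : Int) :
    (p.set k v).getD r 0 = if r = k ∧ k < p.length then v else p.getD r 0 := by
  simp only [List.getD_eq_getElem?_getD, List.getElem?_set]
  split_ifs with h1 h2 h3 h4 <;> simp_all

theorem pvGetD_replicate (n pos : Nat) : (List.replicate n (0 : Int)).getD pos 0 = 0 := by
  simp only [List.getD_eq_getElem?_getD, List.getElem?_replicate]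
  split_ifs <;> rfl

theorem pvInnerA_length (i : Int) (js : List Int) (p : List Int) :
    (pvInnerA i js p).length = p.length := by
  induction js generalizing p with
  | nil => rfl
  | cons j rest ih =>
      unfold pvInnerA
      split_ifs with h
      · rfl
      · rw [ih, PySem.List.length_pySetD]

theorem pvInnerA_spec (n : Nat) (i : Nat) (hi : 1 ≤ i) (t : Nat) :
    ∀ p : List Int, p.length = n → i + t < n → (∀ pos : Nat, 0 ≤ p.getD pos 0) →
    ∀ pos : Nat,
      ((i ≤ pos ∧ pos ≤ i + t ∧ (∀ r : Nat, pos ≤ r → r ≤ i + t → p.getD r 0 = 0)) →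
        (pvInnerA (i : Int) (PySem.List.pyRange (t : Int) (-1) (-1)) p).getD pos 0 = (pos : Int) - i + 1) ∧
      (¬ (i ≤ pos ∧ pos ≤ i + t ∧ (∀ r : Nat, pos ≤ r → r ≤ i + t → p.getD r 0 = 0)) →
        (pvInnerA (i : Int) (PySem.List.pyRange (t : Int) (-1) (-1)) p).getD pos 0 = p.getD pos 0) := by
  induction t with
  | zero =>
      intro p hlen hlt hnn pos
      have hr : PySem.List.pyRange ((0 : Nat) : Int) (-1) (-1) = [0] := by decide
      rw [hr]
      unfold pvInnerA
      simp only [add_zero, zero_add, PySem.List.pyGetD_natCast]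
      by_cases h : p.getD i 0 > 0
      · rw [if_pos h]
        refine ⟨fun ⟨c1, c2, c3⟩ => absurd (c3 i (by omega) (by omega)) (by omega), fun _ => rfl⟩
      · rw [if_neg h]
        have h0 : p.getD i 0 = 0 := le_antisymm (by omega) (hnn i)
        unfold pvInnerA
        rw [PySem.List.pySetD_natCast]
        constructor
        · rintro ⟨c1, c2, c3⟩
          have hpi : pos = i := by omega
          subst hpi
          rw [pvGetD_set, if_pos ⟨rfl, by omega⟩]
          omega
        · intro hnC
          have hpi : pos ≠ i := by
            intro hpi; exact hnC ⟨by omega, by omega, fun r h1 h2 => by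
              have : r = i := by omega
              subst this; exact h0⟩
          rw [pvGetD_set, if_neg (by tauto)]
  | succ t ih =>
      intro p hlen hlt hnn pos
      have hr : PySem.List.pyRange (((t + 1 : Nat)) : Int) (-1) (-1)
          = (((t + 1 : Nat)) : Int) :: PySem.List.pyRange ((t : Nat) : Int) (-1) (-1) := by
        rw [PySem.List.pyRange_neg_one_cons (by push_cast; omega),
          show (((t + 1 : Nat)) : Int) - 1 = ((t : Nat) : Int) by push_cast; ring]
      rw [hr]
      unfold pvInnerA
      rw [show (i : Int) + ((t + 1 : Nat) : Int) = ((i + t + 1 : Nat) : Int) by push_cast; ring,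
        PySem.List.pyGetD_natCast]
      by_cases h : p.getD (i + t + 1) 0 > 0
      · rw [if_pos h]
        refine ⟨fun ⟨c1, c2, c3⟩ => absurd (c3 (i + t + 1) (by omega) (by omega)) (by omega),
          fun _ => rfl⟩
      · rw [if_neg h]
        have h0 : p.getD (i + t + 1) 0 = 0 := le_antisymm (by omega) (hnn _)
        rw [PySem.List.pySetD_natCast]
        set p' := p.set (i + t + 1) (((t + 1 : Nat) : Int) + 1) with hp'
        have hset : ∀ r : Nat, (p').getD r 0 = if r = i + t + 1 ∧ i + t + 1 < p.length then
            ((t + 1 : Nat) : Int) + 1 else p.getD r 0 := fun r => pvGetD_set p _ r _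
        have hp'r : ∀ r : Nat, r ≠ i + t + 1 → p'.getD r 0 = p.getD r 0 := by
          intro r hrneq; rw [hset, if_neg (by tauto)]
        have hp'top : p'.getD (i + t + 1) 0 = ((t + 1 : Nat) : Int) + 1 := by
          rw [hset, if_pos ⟨rfl, by omega⟩]
        have hlen' : p'.length = n := by rw [hp', List.length_set]; exact hlen
        have hnn' : ∀ pos : Nat, 0 ≤ p'.getD pos 0 := by
          intro r; rw [hset]; split_ifs with hc
          · push_cast; omega
          · exact hnn r
        have IH := ih p' hlen' (by omega) hnn' pos
        constructor
        · rintro ⟨c1, c2, c3⟩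
          by_cases hpos : pos = i + t + 1
          · have := IH.2 (by omega)
            rw [this, hpos, hp'top]
            omega
          · refine (IH.1 ⟨c1, by omega, fun r h1 h2 => ?_⟩).trans rfl
            rw [hp'r r (by omega)]
            exact c3 r h1 (by omega)
        · intro hnC
          by_cases hpos : pos = i + t + 1
          · exact absurd ⟨by omega, by omega, fun r h1 h2 => by
              have : r = i + t + 1 := by omega
              subst this; exact h0⟩ hnC
          · have hnC' : ¬ (i ≤ pos ∧ pos ≤ i + t ∧
                (∀ r : Nat, pos ≤ r → r ≤ i + t → p'.getD r 0 = 0)) := by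
              rintro ⟨c1, c2, c3'⟩
              exact hnC ⟨c1, by omega, fun r h1 h2 => by
                by_cases hre : r = i + t + 1
                · subst hre; exact h0
                · rw [← hp'r r hre]; exact c3' r h1 (by omega)⟩
            rw [IH.2 hnC', hp'r pos hpos]

theorem pvCand_big (z : List Int) (hPre : Pre_z_to_prefix z) {i pos : Nat}
    (hi : i < z.length) (hpos : z.length ≤ pos) : pvCand z i pos = 0 := by
  unfold pvCand
  rw [if_neg]
  rintro ⟨c1, c2, c3⟩
  have := hPre i (List.mem_range.mpr hi) c1
  omega

theorem pvECand_big (z : List Int) (hPre : Pre_z_to_prefix z) {i pos : Nat}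
    (hi : i < z.length) (hpos : z.length ≤ pos) : pvECand z i pos = 0 := by
  unfold pvECand
  rw [if_neg]
  rintro ⟨c1, c2, c3⟩
  have := hPre i (List.mem_range.mpr hi) c1
  omega

theorem pvCanon_big (z : List Int) (hPre : Pre_z_to_prefix z) {m pos : Nat}
    (hm : m < z.length) (hpos : z.length ≤ pos) : pvCanon z m pos = 0 := by
  induction m with
  | zero => rfl
  | succ m ih =>
      rw [pvCanon_succ, ih (by omega), pvCand_big z hPre hm hpos]
      simp

theorem pvEMax_big (z : List Int) (hPre : Pre_z_to_prefix z) {m pos : Nat}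
    (hm : m < z.length) (hpos : z.length ≤ pos) : pvEMax z m pos = 0 := by
  induction m with
  | zero => rfl
  | succ m ih =>
      rw [pvEMax_succ, ih (by omega), pvECand_big z hPre hm hpos]
      simp

theorem pvOuterA (z : List Int) (hPre : Pre_z_to_prefix z) :
    ∀ (k m : Nat) (p : List Int), z.length - (m + 1) = k → m ≤ z.length - 1 →
      p.length = z.length →
      (∀ pos : Nat, p.getD pos 0 = pvCanon z m pos) →
      (((PySem.List.pyRange ((m + 1 : Nat) : Int) z.length 1).foldl
          (fun p i => pvInnerA i (PySem.List.pyRange (PySem.List.pyGetD z i 0 - 1) (-1) (-1)) p) p).length = z.length ∧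
       ∀ pos : Nat, ((PySem.List.pyRange ((m + 1 : Nat) : Int) z.length 1).foldl
          (fun p i => pvInnerA i (PySem.List.pyRange (PySem.List.pyGetD z i 0 - 1) (-1) (-1)) p) p).getD pos 0
          = pvCanon z (z.length - 1) pos) := by
  intro k
  induction k with
  | zero =>
      intro m p hk hm hlen hinv
      rw [PySem.List.pyRange_one_eq_nil (by omega)]
      simp only [List.foldl_nil]
      have hm' : m = z.length - 1 := by omega
      exact ⟨hlen, by rw [← hm']; exact hinv⟩
  | succ k ihk =>
      intro m p hk hm hlen hinv
      rw [PySem.List.pyRange_one_cons (by omega)]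
      simp only [List.foldl_cons]
      rw [show ((m + 1 : Nat) : Int) + 1 = ((m + 1 + 1 : Nat) : Int) by push_cast; ring]
      have hm1len : m + 1 < z.length := by omega
      have hPrei := hPre (m + 1) (List.mem_range.mpr hm1len) (by omega)
      have hnn : ∀ pos : Nat, 0 ≤ p.getD pos 0 := fun pos => by
        rw [hinv]; exact pvCanon_nonneg z m pos
      rw [show PySem.List.pyGetD z ((m + 1 : Nat) : Int) 0 = z.getD (m + 1) 0 from
        PySem.List.pyGetD_natCast z (m + 1) 0]
      by_cases hz1 : 0 < z.getD (m + 1) 0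
      · -- non-empty inner range
        set t : Nat := (z.getD (m + 1) 0 - 1).toNat with hts
        have ht : ((t : Nat) : Int) = z.getD (m + 1) 0 - 1 := Int.toNat_of_nonneg (by omega)
        have hit : (m + 1) + t < z.length := by omega
        have HS := pvInnerA_spec z.length (m + 1) (by omega) t p hlen hit hnn
        rw [show z.getD (m + 1) 0 - 1 = ((t : Nat) : Int) from ht.symm]
        have hinv1 : ∀ pos : Nat,
            (pvInnerA ((m + 1 : Nat) : Int) (PySem.List.pyRange ((t : Nat) : Int) (-1) (-1)) p).getD pos 0
              = pvCanon z (m + 1) pos := by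
          intro pos
          by_cases hC : ((m + 1) ≤ pos ∧ pos ≤ (m + 1) + t ∧
              (∀ r : Nat, pos ≤ r → r ≤ (m + 1) + t → p.getD r 0 = 0))
          · rw [(HS pos).1 hC]
            obtain ⟨c1, c2, c3⟩ := hC
            have h00 : pvCanon z m pos = 0 := by rw [← hinv pos]; exact c3 pos (le_refl _) c2
            have hcand : pvCand z (m + 1) pos = (pos : Int) - (m + 1) + 1 :=
              pvCand_eq_of_pos z ⟨by omega, c1, by omega⟩
            rw [pvCanon_succ, h00, hcand]
            push_cast
            omega
          · rw [(HS pos).2 hC, hinv pos, pvCanon_succ]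
            by_cases hcc : 0 < pvCand z (m + 1) pos
            · obtain ⟨d1, d2, d3⟩ := (pvCand_pos_iff z (m + 1) pos).mp hcc
              have hpt : pos ≤ (m + 1) + t := by omega
              have hex : ∃ r : Nat, pos ≤ r ∧ r ≤ (m + 1) + t ∧ p.getD r 0 ≠ 0 := by
                by_contra hno
                push_neg at hno
                exact hC ⟨d2, hpt, fun r h1 h2 => hno r h1 h2⟩
              obtain ⟨r, hr1, hr2, hr3⟩ := hex
              have hcr : 0 < pvCanon z m r := by
                have := pvCanon_nonneg z m r
                rw [hinv r] at hr3
                omega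
              obtain ⟨i1, hi11, hi12, hi13⟩ := pvCanon_pos_exists z hcr
              obtain ⟨e1, e2, e3⟩ := (pvCand_pos_iff z i1 r).mp hi13
              have hcand1 : pvCand z i1 pos = (pos : Int) - i1 + 1 :=
                pvCand_eq_of_pos z ⟨e1, by omega, by omega⟩
              have hle1 : pvCand z i1 pos ≤ pvCanon z m pos := pvCand_le_canon z pos e1 hi12
              have hcndv : pvCand z (m + 1) pos = (pos : Int) - (m + 1) + 1 :=
                pvCand_eq_of_pos z ⟨d1, d2, d3⟩
              push_cast at hcand1 hcndv ⊢
              omega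
            · have := pvCand_nonneg z (m + 1) pos
              have := pvCanon_nonneg z m pos
              omega
        have hlen1 : (pvInnerA ((m + 1 : Nat) : Int)
            (PySem.List.pyRange ((t : Nat) : Int) (-1) (-1)) p).length = z.length := by
          rw [pvInnerA_length]; exact hlen
        exact ihk (m + 1) _ (by omega) (by omega) hlen1 hinv1
      · -- z[m+1] ≤ 0 : empty inner range, p unchanged
        rw [PySem.List.pyRange_neg_one_eq_nil (by omega)]
        have hinv1 : ∀ pos : Nat, (pvInnerA ((m + 1 : Nat) : Int) [] p).getD pos 0
            = pvCanon z (m + 1) pos := by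
          intro pos
          show p.getD pos 0 = pvCanon z (m + 1) pos
          have hcand : pvCand z (m + 1) pos = 0 := by
            unfold pvCand
            rw [if_neg]
            rintro ⟨c1, c2, c3⟩
            omega
          have := pvCanon_nonneg z m pos
          rw [hinv pos, pvCanon_succ, hcand]
          omega
        exact ihk (m + 1) _ (by omega) (by omega) hlen hinv1

theorem pvA_result (z : List Int) (hPre : Pre_z_to_prefix z) :
    (z_to_prefix z).length = z.length ∧
    ∀ pos : Nat, (z_to_prefix z).getD pos 0 = pvCanon z (z.length - 1) pos := by
  have H := pvOuterA z hPre (z.length - 1) 0 (List.replicate z.length 0) rfl (by omega)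
    (by simp) (fun pos => by rw [pvGetD_replicate]; rfl)
  unfold z_to_prefix
  have h1 : ((0 + 1 : Nat) : Int) = (1 : Int) := by norm_num
  rw [h1] at H
  exact H

-- ===== B-side =====

theorem pvP1B (z : List Int) (hPre : Pre_z_to_prefix z) :
    ∀ (k m : Nat) (p : List Int), z.length - (m + 1) = k → m ≤ z.length - 1 →
      p.length = z.length →
      (∀ pos : Nat, p.getD pos 0 = pvEMax z m pos) →
      (((PySem.List.pyRange ((m + 1 : Nat) : Int) z.length 1).foldl
          (fun p i =>
            let zi := PySem.List.pyGetD z i 0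
            if zi > 0 then
              let e := i + zi - 1
              if PySem.List.pyGetD p e 0 < zi then PySem.List.pySetD p e zi else p
            else p) p).length = z.length ∧
       ∀ pos : Nat, ((PySem.List.pyRange ((m + 1 : Nat) : Int) z.length 1).foldl
          (fun p i =>
            let zi := PySem.List.pyGetD z i 0
            if zi > 0 then
              let e := i + zi - 1
              if PySem.List.pyGetD p e 0 < zi then PySem.List.pySetD p e zi else p
            else p) p).getD pos 0 = pvEMax z (z.length - 1) pos) := by
  intro k
  induction k with
  | zero =>
      intro m p hk hm hlen hinv
      rw [PySem.List.pyRange_one_eq_nil (by omega)]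
      simp only [List.foldl_nil]
      have hm' : m = z.length - 1 := by omega
      exact ⟨hlen, by rw [← hm']; exact hinv⟩
  | succ k ihk =>
      intro m p hk hm hlen hinv
      rw [PySem.List.pyRange_one_cons (by omega)]
      simp only [List.foldl_cons]
      rw [show ((m + 1 : Nat) : Int) + 1 = ((m + 1 + 1 : Nat) : Int) by push_cast; ring]
      have hm1len : m + 1 < z.length := by omega
      have hPrei := hPre (m + 1) (List.mem_range.mpr hm1len) (by omega)
      rw [show PySem.List.pyGetD z ((m + 1 : Nat) : Int) 0 = z.getD (m + 1) 0 from
        PySem.List.pyGetD_natCast z (m + 1) 0]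
      by_cases hz1 : z.getD (m + 1) 0 > 0
      · rw [if_pos hz1]
        set eN : Nat := (((m + 1 : Nat) : Int) + z.getD (m + 1) 0 - 1).toNat with heNs
        have heN : ((eN : Nat) : Int) = ((m + 1 : Nat) : Int) + z.getD (m + 1) 0 - 1 :=
          Int.toNat_of_nonneg (by push_cast; omega)
        have heNlen : eN < z.length := by omega
        rw [show ((m + 1 : Nat) : Int) + z.getD (m + 1) 0 - 1 = ((eN : Nat) : Int) from heN.symm,
          PySem.List.pyGetD_natCast, PySem.List.pySetD_natCast]
        have hstep : ∀ pos : Nat,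
            (if p.getD eN 0 < z.getD (m + 1) 0 then p.set eN (z.getD (m + 1) 0) else p).getD pos 0
              = pvEMax z (m + 1) pos := by
          intro pos
          have hEc : pvECand z (m + 1) pos = if pos = eN then z.getD (m + 1) 0 else 0 := by
            unfold pvECand
            by_cases hpe : pos = eN
            · rw [if_pos ⟨by omega, hz1, by rw [hpe]; omega⟩, if_pos hpe]
            · rw [if_neg, if_neg hpe]
              rintro ⟨c1, c2, c3⟩
              exact hpe (by omega)
          have hnn := pvEMax_nonneg z m pos
          split_ifs with hlt
          · rw [pvGetD_set, pvEMax_succ, hEc, hinv pos]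
            by_cases hpe : pos = eN
            · rw [if_pos ⟨hpe, by omega⟩, if_pos hpe]
              rw [hinv eN] at hlt
              subst hpe
              omega
            · rw [if_neg (by tauto), if_neg hpe]
              omega
          · rw [pvEMax_succ, hEc, hinv pos]
            by_cases hpe : pos = eN
            · rw [if_pos hpe]
              rw [hinv eN] at hlt
              subst hpe
              omega
            · rw [if_neg hpe]
              omega
        have hlen1 : (if p.getD eN 0 < z.getD (m + 1) 0
            then p.set eN (z.getD (m + 1) 0) else p).length = z.length := by
          split_ifs <;> simp [hlen]
        exact ihk (m + 1) _ (by omega) (by omega) hlen1 hstep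
      · rw [if_neg hz1]
        have hstep : ∀ pos : Nat, p.getD pos 0 = pvEMax z (m + 1) pos := by
          intro pos
          have hEc : pvECand z (m + 1) pos = 0 := by
            unfold pvECand
            rw [if_neg]
            rintro ⟨c1, c2, c3⟩
            omega
          have := pvEMax_nonneg z m pos
          rw [hinv pos, pvEMax_succ, hEc]
          omega
        exact ihk (m + 1) _ (by omega) (by omega) hlen hstep

theorem pvBackB (z : List Int) :
    ∀ (K : Nat) (p : List Int), K ≤ z.length - 1 → p.length = z.length →
      (∀ pos : Nat, p.getD pos 0 =
        if K ≤ pos then pvCanon z (z.length - 1) pos else pvEMax z (z.length - 1) pos) →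
      (((PySem.List.pyRange ((K : Nat) : Int) 0 (-1)).foldl
          (fun p k =>
            if PySem.List.pyGetD p k 0 - 1 > PySem.List.pyGetD p (k - 1) 0 then
              PySem.List.pySetD p (k - 1) (PySem.List.pyGetD p k 0 - 1)
            else p) p).length = z.length ∧
       ∀ pos : Nat, ((PySem.List.pyRange ((K : Nat) : Int) 0 (-1)).foldl
          (fun p k =>
            if PySem.List.pyGetD p k 0 - 1 > PySem.List.pyGetD p (k - 1) 0 then
              PySem.List.pySetD p (k - 1) (PySem.List.pyGetD p k 0 - 1)
            else p) p).getD pos 0 = pvCanon z (z.length - 1) pos) := by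
  intro K
  induction K with
  | zero =>
      intro p hK hlen hinv
      rw [PySem.List.pyRange_neg_one_eq_nil (by omega)]
      simp only [List.foldl_nil]
      exact ⟨hlen, fun pos => by rw [hinv pos, if_pos (Nat.zero_le _)]⟩
  | succ K ih =>
      intro p hK hlen hinv
      rw [PySem.List.pyRange_neg_one_cons (by push_cast; omega)]
      simp only [List.foldl_cons]
      rw [show ((K + 1 : Nat) : Int) - 1 = ((K : Nat) : Int) by push_cast; ring,
        PySem.List.pyGetD_natCast, PySem.List.pyGetD_natCast, PySem.List.pySetD_natCast]
      have hKlen : K < z.length := by omega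
      have hvK1 : p.getD (K + 1) 0 = pvCanon z (z.length - 1) (K + 1) := by
        rw [hinv (K + 1), if_pos (le_refl _)]
      have hvK : p.getD K 0 = pvEMax z (z.length - 1) K := by
        rw [hinv K, if_neg (by omega)]
      have hchar := pvCanon_char z (z.length - 1) K
      have hstep : ∀ pos : Nat,
          (if p.getD (K + 1) 0 - 1 > p.getD K 0 then p.set K (p.getD (K + 1) 0 - 1) else p).getD pos 0
            = if K ≤ pos then pvCanon z (z.length - 1) pos else pvEMax z (z.length - 1) pos := by
        intro pos
        rw [hvK1, hvK]
        split_ifs with hlt hpos hpos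
        · rw [pvGetD_set]
          by_cases hpe : pos = K
          · rw [if_pos ⟨hpe, by omega⟩, hpe]
            omega
          · rw [if_neg (by tauto), hinv pos, if_pos (by omega)]
        · rw [pvGetD_set]
          have hpe : pos ≠ K := by omega
          rw [if_neg (by tauto), hinv pos, if_neg (by omega)]
        · by_cases hpe : pos = K
          · rw [hpe, hvK]
            omega
          · rw [hinv pos, if_pos (by omega)]
        · rw [hinv pos, if_neg (by omega)]
      have hlen1 : (if p.getD (K + 1) 0 - 1 > p.getD K 0
          then p.set K (p.getD (K + 1) 0 - 1) else p).length = z.length := by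
        split_ifs <;> simp [hlen]
      exact ih _ (by omega) hlen1 hstep

theorem pvB_result (z : List Int) (hPre : Pre_z_to_prefix z) :
    (z_to_prefix_alt z).length = z.length ∧
    ∀ pos : Nat, (z_to_prefix_alt z).getD pos 0 = pvCanon z (z.length - 1) pos := by
  by_cases hn : z.length = 0
  · have hz : z = [] := List.eq_nil_of_length_eq_zero hn
    subst hz
    constructor
    · decide
    · intro pos
      show ([] : List Int).getD pos 0 = pvCanon [] 0 pos
      simp [pvCanon]
  · have hn1 : 1 ≤ z.length := by omega
    have hdef : z_to_prefix_alt z = (PySem.List.pyRange ((z.length : Int) - 1) 0 (-1)).foldl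
        (fun p k =>
          if PySem.List.pyGetD p k 0 - 1 > PySem.List.pyGetD p (k - 1) 0 then
            PySem.List.pySetD p (k - 1) (PySem.List.pyGetD p k 0 - 1)
          else p)
        ((PySem.List.pyRange 1 z.length 1).foldl
          (fun p i =>
            let zi := PySem.List.pyGetD z i 0
            if zi > 0 then
              let e := i + zi - 1
              if PySem.List.pyGetD p e 0 < zi then PySem.List.pySetD p e zi else p
            else p) (List.replicate z.length 0)) := rfl
    rw [hdef]
    have HP := pvP1B z hPre (z.length - 1) 0 (List.replicate z.length 0) rfl (by omega)
      (by simp) (fun pos => by rw [pvGetD_replicate]; rfl)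
    rw [show ((0 + 1 : Nat) : Int) = (1 : Int) by norm_num] at HP
    have hbase : ∀ pos : Nat,
        ((PySem.List.pyRange 1 z.length 1).foldl
          (fun p i =>
            let zi := PySem.List.pyGetD z i 0
            if zi > 0 then
              let e := i + zi - 1
              if PySem.List.pyGetD p e 0 < zi then PySem.List.pySetD p e zi else p
            else p) (List.replicate z.length 0)).getD pos 0 =
        if (z.length - 1) ≤ pos then pvCanon z (z.length - 1) pos
        else pvEMax z (z.length - 1) pos := by
      intro pos
      rw [HP.2 pos]
      split_ifs with h
      · by_cases hbig : z.length ≤ pos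
        · rw [pvEMax_big z hPre (by omega) hbig, pvCanon_big z hPre (by omega) hbig]
        · have hpe : pos = z.length - 1 := by omega
          rw [hpe, (pvCanon_top z hPre hn1 (z.length - 1) (le_refl _))]
      · rfl
    have HB := pvBackB z (z.length - 1) _ (le_refl _) HP.1 hbase
    rw [show ((z.length : Int)) - 1 = (((z.length - 1 : Nat)) : Int) by omega]
    exact HB

-- ===== VERDICT (by name: the statement is the Claim_ definition above) =====
theorem z_to_prefix_spec : Claim_equal_z_to_prefix := by
  intro z _hDom hPre
  unfold Spec_z_to_prefix
  obtain ⟨hal, ha⟩ := pvA_result z hPre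
  obtain ⟨hbl, hb⟩ := pvB_result z hPre
  apply List.ext_getElem (by omega)
  intro k hk1 hk2
  calc (z_to_prefix z)[k] = (z_to_prefix z).getD k 0 := (List.getD_eq_getElem _ _ hk1).symm
    _ = pvCanon z (z.length - 1) k := ha k
    _ = (z_to_prefix_alt z).getD k 0 := (hb k).symm
    _ = (z_to_prefix_alt z)[k] := List.getD_eq_getElem _ _ hk2
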